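-- pv_equiv track=rewrite | github.com/essistanbul/mycodes | kelime.py | metin_analizi
-- ===== SOURCE A (Python) =====
-- def metin_analizi(metin):
--     # Cümle sayısını hesapla ('.' ile ayrılmış)
--     cumleler = metin.split('.')
--     cumleler = [c for c in cumleler if c.strip() != '']  # Boş cümleleri çıkar
--     cumle_sayisi = len(cumleler)
--
--     # Kelime sayısını hesapla
--     kelimeler = metin.split()
--     kelime_sayisi = len(kelimeler)
--
--     # Karakter sayısını hesapla (boşluklar dahil)
--     karakter_sayisi = len(metin)
--
--     # Karakter sayısını boşluklar hariç hesapla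
--     karakter_sayisi_boşluksuz = len(metin.replace(" ", ""))
--
--     return kelime_sayisi, karakter_sayisi, cumle_sayisi, karakter_sayisi_boşluksuz
-- ===== SOURCE B (Python) =====
-- def metin_analizi(metin):
--     kelime_sayisi = 0
--     in_word = False
--     bosluksuz = 0
--     cumle_sayisi = 0
--     seg_has = False
--     for c in metin:
--         if c != ' ':
--             bosluksuz += 1
--         if c.isspace():
--             in_word = False
--         else:
--             if not in_word:
--                 kelime_sayisi += 1
--             in_word = True
--         if c == '.':
--             if seg_has:
--                 cumle_sayisi += 1
--             seg_has = False
--         elif not c.isspace():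
--             seg_has = True
--     if seg_has:
--         cumle_sayisi += 1
--     return kelime_sayisi, len(metin), cumle_sayisi, bosluksuz
-- ===== Notes on version B (the rewrite author's own statement) =====
-- stated objective: alternative
-- what changed: Replaced the four separate library passes (dot-split with strip filter, whitespace split, length, space removal) by a single loop over the characters maintaining word-start, sentence-content and non-space counters.
import Mathlib
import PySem

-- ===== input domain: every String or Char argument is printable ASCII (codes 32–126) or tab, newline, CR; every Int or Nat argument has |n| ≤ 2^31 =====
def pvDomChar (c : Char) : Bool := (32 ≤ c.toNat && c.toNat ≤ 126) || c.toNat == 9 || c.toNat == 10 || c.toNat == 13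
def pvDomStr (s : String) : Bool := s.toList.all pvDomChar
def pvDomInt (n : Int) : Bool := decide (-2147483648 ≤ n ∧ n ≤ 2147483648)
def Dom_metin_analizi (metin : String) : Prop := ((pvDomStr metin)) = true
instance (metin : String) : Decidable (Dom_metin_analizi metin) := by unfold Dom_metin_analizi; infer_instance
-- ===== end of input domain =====

-- B replaces A's four separate library passes (dot-split with strip filter, whitespace split, length, space removal)
-- by one loop over the characters maintaining word/sentence/non-space counters (objective: alternative decomposition).

set_option maxHeartbeats 1000000


-- ===== PORT A =====
def metin_analizi (metin : String) : Int × Int × Int × Int :=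
  let cs := metin.toList
  -- cumleler = metin.split('.'); keep those with c.strip() != ''
  let cumleler := PySem.Chars.splitOn cs ['.']
  let cumleler2 := cumleler.filter (fun c => PySem.Chars.strip c != [])
  let cumle_sayisi : Int := cumleler2.length
  -- kelimeler = metin.split()
  let kelimeler := PySem.Chars.split₀ cs
  let kelime_sayisi : Int := kelimeler.length
  -- len(metin)
  let karakter_sayisi : Int := cs.length
  -- len(metin.replace(" ", ""))
  let karakter_sayisi_bosluksuz : Int := (PySem.Chars.replace cs [' '] []).length
  (kelime_sayisi, karakter_sayisi, cumle_sayisi, karakter_sayisi_bosluksuz)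

-- ===== PORT B =====
-- state: (kelime_sayisi, in_word, bosluksuz, cumle_sayisi, seg_has)
def pvBStep (st : Int × Bool × Int × Int × Bool) (c : Char) : Int × Bool × Int × Int × Bool :=
  let (kelime, inw, bos, cml, seg) := st
  let bos := if c != ' ' then bos + 1 else bos
  let (kelime, inw) :=
    if PySem.Chars.isspace c then (kelime, false)
    else (if !inw then kelime + 1 else kelime, true)
  let (cml, seg) :=
    if c == '.' then ((if seg then cml + 1 else cml), false)
    else if !(PySem.Chars.isspace c) then (cml, true)
    else (cml, seg)
  (kelime, inw, bos, cml, seg)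

def metin_analizi_alt (metin : String) : Int × Int × Int × Int :=
  let cs := metin.toList
  let (kelime, _inw, bos, cml, seg) := cs.foldl pvBStep (0, false, 0, 0, false)
  let cml := if seg then cml + 1 else cml
  (kelime, (cs.length : Int), cml, bos)

-- ===== PRECONDITION & SPEC =====
def Spec_metin_analizi (metin : String) (out : Int × Int × Int × Int) : Prop := out = metin_analizi_alt metin
instance (metin : String) (out : Int × Int × Int × Int) : Decidable (Spec_metin_analizi metin out) := by unfold Spec_metin_analizi; infer_instance

-- ===== CLAIM (what is proved, stated in full; the proofs are below) =====
def Claim_equal_metin_analizi : Prop := ∀ (metin : String), Dom_metin_analizi metin → Spec_metin_analizi metin (metin_analizi metin)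

-- ===== LEMMAS AND PROOFS =====

-- words still to be started in l, given whether we are currently inside a word
def pvWcnt (l : List Char) (inw : Bool) : Nat :=
  match l with
  | [] => 0
  | c :: t => if PySem.Chars.isspace c then pvWcnt t false
              else (if inw then 0 else 1) + pvWcnt t true

-- final in_word flag
def pvEndW (l : List Char) (inw : Bool) : Bool :=
  match l with
  | [] => inw
  | c :: t => if PySem.Chars.isspace c then pvEndW t false else pvEndW t true

-- sentences closed by a '.' in l, given whether the current segment already has content
def pvClosed (l : List Char) (seg : Bool) : Nat :=
  match l with
  | [] => 0
  | c :: t => if c = '.' then (if seg then 1 else 0) + pvClosed t false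
              else pvClosed t (seg || !PySem.Chars.isspace c)

-- final seg_has flag
def pvPend (l : List Char) (seg : Bool) : Bool :=
  match l with
  | [] => seg
  | c :: t => if c = '.' then pvPend t false
              else pvPend t (seg || !PySem.Chars.isspace c)

def pvB2n (b : Bool) : Nat := if b then 1 else 0

theorem pvFoldB (l : List Char) : ∀ (k bos cml : Int) (inw seg : Bool),
    l.foldl pvBStep (k, inw, bos, cml, seg) =
      (k + pvWcnt l inw, pvEndW l inw,
       bos + (l.countP (fun c => c != ' ') : Int),
       cml + pvClosed l seg, pvPend l seg) := by
  induction l with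
  | nil => intro k bos cml inw seg; simp [pvWcnt, pvEndW, pvClosed, pvPend]
  | cons c t ih =>
    intro k bos cml inw seg
    simp only [List.foldl_cons, pvBStep, List.countP_cons]
    by_cases hsp : PySem.Chars.isspace c <;> by_cases hdot : c = '.' <;> by_cases hspace : c = ' ' <;>
      first
        | (exfalso; subst_vars; first | (revert hsp; decide) | (revert hspace; decide) | (revert hdot; decide))
        | (cases inw <;> cases seg <;>
            simp [hsp, hdot, hspace, ih, pvWcnt, pvEndW, pvClosed, pvPend] <;>
            push_cast <;> ring_nf <;> try simp [show PySem.Chars.isspace ' ' = true from by decide,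
              show PySem.Chars.isspace '.' = false from by decide] <;> try omega)

-- ---- A side: words ----
theorem pvSplit0Go (l : List Char) : ∀ (cur : List Char) (acc : List (List Char)),
    (PySem.Chars.split₀.go l cur acc).length =
      acc.length + pvB2n (!cur.isEmpty) + pvWcnt l (!cur.isEmpty) := by
  induction l with
  | nil =>
    intro cur acc
    cases cur <;> simp [PySem.Chars.split₀.go, pvWcnt, pvB2n]
  | cons c t ih =>
    intro cur acc
    by_cases hsp : PySem.Chars.isspace c
    · cases cur <;>
        simp [PySem.Chars.split₀.go, hsp, ih, pvWcnt, pvB2n] <;> omega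
    · cases cur <;> cases hc : (t : List Char).isEmpty <;>
        simp [PySem.Chars.split₀.go, hsp, ih, pvWcnt, pvB2n] <;> omega

theorem pvWords (cs : List Char) :
    (PySem.Chars.split₀ cs).length = pvWcnt cs false := by
  have := pvSplit0Go cs [] []
  simpa [PySem.Chars.split₀, pvB2n] using this

-- ---- A side: no-space characters ----
theorem pvReplaceGo (l : List Char) : ∀ (fuel : Nat) (acc : List Char),
    l.length ≤ fuel →
    PySem.Chars.replace.go [' '] [] fuel l acc =
      acc.reverse ++ l.filter (fun c => c != ' ') := by
  induction l with
  | nil =>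
    intro fuel acc _
    cases fuel <;> simp [PySem.Chars.replace.go]
  | cons c t ih =>
    intro fuel acc hf
    cases fuel with
    | zero => simp at hf
    | succ n =>
      by_cases hc : c = ' '
      · subst hc
        simp [PySem.Chars.replace.go, List.isPrefixOf, ih n acc (by simpa using hf)]
      · have : ¬ ([' '].isPrefixOf (c :: t) = true) := by
          simp [List.isPrefixOf]; intro h; exact hc h.symm
        simp only [PySem.Chars.replace.go, this, if_neg, if_false]
        rw [ih n (c :: acc) (by simpa using hf)]
        simp [hc]

theorem pvNoSpace (cs : List Char) :
    (PySem.Chars.replace cs [' '] []).length = cs.countP (fun c => c != ' ') := by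
  rw [PySem.Chars.replace]
  simp only [List.isEmpty_cons, if_neg, Bool.false_eq_true, not_false_iff]
  rw [pvReplaceGo cs cs.length [] (le_refl _)]
  simp [List.countP_eq_length_filter]

-- ---- A side: sentences ----
-- a segment passes A's filter iff it contains a non-whitespace character
theorem pvStripNe (p : List Char) :
    (PySem.Chars.strip p != []) = p.any (fun c => !PySem.Chars.isspace c) := by
  rcases h : p.any (fun c => !PySem.Chars.isspace c) with _ | _
  · have hall : ∀ c ∈ p, PySem.Chars.isspace c := by
      intro c hc
      have := List.any_eq_false.mp h c hc
      simpa using this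
    have h1 : PySem.Chars.lstrip p = [] := by
      simp [PySem.Chars.lstrip, List.dropWhile_eq_nil_iff]
      exact hall
    simp [PySem.Chars.strip, h1, PySem.Chars.rstrip]
  · rcases List.any_eq_true.mp h with ⟨c, hc, hns⟩
    have h1 : PySem.Chars.lstrip p ≠ [] := by
      simp only [PySem.Chars.lstrip, ne_eq, List.dropWhile_eq_nil_iff]
      intro hall
      rcases List.mem_iff_get.mp hc with _
      exact absurd (hall c hc) (by simpa using hns)
    -- lstrip p contains a non-space char, namely its head
    have h2 : ∃ d ∈ PySem.Chars.lstrip p, ¬ PySem.Chars.isspace d := by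
      rcases hlp : PySem.Chars.lstrip p with _ | ⟨d, t⟩
      · exact absurd hlp h1
      · refine ⟨d, by simp, ?_⟩
        have h0 := List.head_dropWhile_not (p := fun c => PySem.Chars.isspace c) (l := p)
          (by simpa [PySem.Chars.lstrip] using h1)
        simp only [PySem.Chars.lstrip] at hlp
        simp only [hlp, List.head_cons] at h0
        simp [h0]
    have h3 : PySem.Chars.strip p ≠ [] := by
      rcases h2 with ⟨d, hd, hdn⟩
      simp only [PySem.Chars.strip, PySem.Chars.rstrip, ne_eq, List.reverse_eq_nil_iff,
        List.dropWhile_eq_nil_iff]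
      intro hall
      exact hdn (by simpa using hall d (by simpa using hd))
    simpa using h3

theorem pvSplitOnGo (l : List Char) : ∀ (fuel : Nat) (cur : List Char) (acc : List (List Char)),
    l.length < fuel →
    ((PySem.Chars.splitOn.go ['.'] fuel l cur acc).filter
        (fun c => PySem.Chars.strip c != [])).length =
      (acc.filter (fun c => PySem.Chars.strip c != [])).length +
        pvClosed l (cur.any (fun c => !PySem.Chars.isspace c)) +
        pvB2n (pvPend l (cur.any (fun c => !PySem.Chars.isspace c))) := by
  induction l with
  | nil =>
    intro fuel cur acc hf
    cases fuel with
    | zero => omega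
    | succ n =>
      simp only [PySem.Chars.splitOn.go]
      rw [List.filter_reverse]
      simp only [List.filter_cons]
      rw [pvStripNe]
      cases h : cur.reverse.any (fun c => !PySem.Chars.isspace c) <;>
        simp [pvClosed, pvPend, pvB2n, List.any_reverse] at h ⊢ <;> (try simp [h]) <;> try exact h
  | cons c t ih =>
    intro fuel cur acc hf
    cases fuel with
    | zero => omega
    | succ n =>
      by_cases hdot : c = '.'
      · subst hdot
        have hpre : ['.'].isPrefixOf ('.' :: t) = true := by simp [List.isPrefixOf]
        simp only [PySem.Chars.splitOn.go, hpre, if_true, List.length_cons, List.length_nil,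
          List.drop_succ_cons, List.drop_zero]
        rw [ih n [] (cur.reverse :: acc) (by simpa using hf)]
        simp only [List.filter_cons]
        rw [pvStripNe]
        have hni : ¬ PySem.Chars.isspace '.' = true := by decide
        cases h : cur.any (fun c => !PySem.Chars.isspace c) <;>
          cases hp : pvPend t false <;>
          simp [pvClosed, pvPend, pvB2n, List.any_reverse, h, hp] <;> omega
      · have hpre : ¬ (['.'].isPrefixOf (c :: t) = true) := by
          simp [List.isPrefixOf]; intro h; exact hdot h.symm
        simp only [PySem.Chars.splitOn.go, hpre, if_neg, if_false, Bool.false_eq_true]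
        rw [ih n (c :: cur) acc (by simpa using hf)]
        simp [pvClosed, pvPend, hdot, List.any_cons, Bool.or_comm]

theorem pvSentences (cs : List Char) :
    ((PySem.Chars.splitOn cs ['.']).filter (fun c => PySem.Chars.strip c != [])).length =
      pvClosed cs false + pvB2n (pvPend cs false) := by
  have := pvSplitOnGo cs (cs.length + 1) [] [] (by omega)
  simpa [PySem.Chars.splitOn] using this

-- ===== VERDICT (by name: the statement is the Claim_ definition above) =====
theorem metin_analizi_spec : Claim_equal_metin_analizi := by
  intro metin _
  dsimp only [Spec_metin_analizi, metin_analizi, metin_analizi_alt]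
  rw [pvFoldB]
  simp only [pvWords, pvNoSpace, pvSentences]
  cases h : pvPend metin.toList false <;>
    simp [pvB2n, h] <;> push_cast <;> ring
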